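-- pv_equiv track=rewrite | github.com/Harsha4049/resume_gen | app/services/domain_rewriter.py | grade_skills
-- ===== SOURCE A (Python) =====
-- from typing import List, Optional, Dict
--
-- def grade_skills(structured_jd: Optional[Dict], chunks: List[Dict]) -> Dict[str, List[str]]:
--     """Grade skills into strong/working/exposure using frequency and support level."""
--     if not structured_jd:
--         return {
--             "required": [],
--             "important": [],
--             "optional": [],
--             "strong": [],
--             "working": [],
--             "exposure": [],
--             "required_direct": [],
--             "required_derived": [],
--             "required_missing": [],
--         }
--
--     required = structured_jd.get("must_have_skills", []) or []
--     important = structured_jd.get("nice_to_have_skills", []) or []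
--     optional: List[str] = []
--
--     skill_candidates = required + important
--     skill_candidates = [s for s in skill_candidates if isinstance(s, str) and s.strip()]
--     if not skill_candidates:
--         return {
--             "required": required,
--             "important": important,
--             "optional": optional,
--             "strong": [],
--             "working": [],
--             "exposure": [],
--             "required_direct": [],
--             "required_derived": [],
--             "required_missing": required,
--         }
--
--     strong = []
--     working = []
--     exposure = []
--     required_direct = []
--     required_derived = []
--     required_missing = []
--
--     for skill in skill_candidates:
--         token = skill.lower()
--         total = 0
--         direct_hits = 0
--         for chunk in chunks:
--             text = chunk.get("text", "").lower()
--             if token in text: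
--                 total += 1
--                 if chunk.get("support_level") == "direct":
--                     direct_hits += 1
--
--         if direct_hits >= 2 or (direct_hits == 1 and total >= 2):
--             strong.append(skill)
--         elif direct_hits == 1:
--             working.append(skill)
--         elif total >= 2:
--             working.append(skill)
--         elif total == 1:
--             exposure.append(skill)
--
--         if skill in required:
--             if direct_hits >= 1:
--                 required_direct.append(skill)
--             elif total >= 1:
--                 required_derived.append(skill)
--             else:
--                 required_missing.append(skill)
--
--     return {
--         "required": required,
--         "important": important,
--         "optional": optional,
--         "strong": strong,
--         "working": working,
--         "exposure": exposure,
--         "required_direct": required_direct,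
--         "required_derived": required_derived,
--         "required_missing": required_missing,
--     }
-- ===== SOURCE B (Python) =====
-- from typing import List, Optional, Dict
--
--
-- def grade_skills(structured_jd: Optional[Dict], chunks: List[Dict]) -> Dict[str, List[str]]:
--     """Grade skills into strong/working/exposure using frequency and support level."""
--     out = {"required": [], "important": [], "optional": [], "strong": [],
--            "working": [], "exposure": [], "required_direct": [],
--            "required_derived": [], "required_missing": []}
--     if not structured_jd:
--         return out
--
--     required = structured_jd.get("must_have_skills", []) or []
--     important = structured_jd.get("nice_to_have_skills", []) or []
--     out["required"] = required
--     out["important"] = important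
--
--     candidates = [s for s in required + important if isinstance(s, str) and s.strip()]
--     if not candidates:
--         out["required_missing"] = required
--         return out
--
--     # hash index of distinct lowered tokens; duplicate skills share one entry
--     counts = {s.lower(): [0, 0] for s in candidates}  # token -> [total, direct]
--
--     # single chunk-major pass: each chunk text is lowercased once and scanned
--     # once per DISTINCT token, instead of A's per-skill rescans of every chunk
--     for chunk in chunks:
--         text = chunk.get("text", "").lower()
--         hit = chunk.get("support_level") == "direct"
--         for tok, c in counts.items():
--             if tok in text:
--                 c[0] += 1
--                 if hit:
--                     c[1] += 1
--
--     # classification pass: one dict lookup per candidate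
--     for s in candidates:
--         t, d = counts[s.lower()]
--         if d >= 2 or (d == 1 and t >= 2):
--             out["strong"].append(s)
--         elif d == 1 or t >= 2:
--             out["working"].append(s)
--         elif t == 1:
--             out["exposure"].append(s)
--         if s in required:
--             key = "required_direct" if d else "required_derived" if t else "required_missing"
--             out[key].append(s)
--     return out
-- ===== Notes on version B (the rewrite author's own statement) =====
-- stated objective: alternative
-- what changed: B inverts A's loop nest: it builds a hash index mapping each DISTINCT lowered token to a [total, direct] counter, fills it in one chunk-major pass (each chunk text is lowercased once and scanned once per distinct token, duplicate skills share one counter), and then classifies each candidate with a single dict lookup, instead of A's skill-major loop that re-lowercases and rescans every chunk for every skill occurrence.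
import Mathlib
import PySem

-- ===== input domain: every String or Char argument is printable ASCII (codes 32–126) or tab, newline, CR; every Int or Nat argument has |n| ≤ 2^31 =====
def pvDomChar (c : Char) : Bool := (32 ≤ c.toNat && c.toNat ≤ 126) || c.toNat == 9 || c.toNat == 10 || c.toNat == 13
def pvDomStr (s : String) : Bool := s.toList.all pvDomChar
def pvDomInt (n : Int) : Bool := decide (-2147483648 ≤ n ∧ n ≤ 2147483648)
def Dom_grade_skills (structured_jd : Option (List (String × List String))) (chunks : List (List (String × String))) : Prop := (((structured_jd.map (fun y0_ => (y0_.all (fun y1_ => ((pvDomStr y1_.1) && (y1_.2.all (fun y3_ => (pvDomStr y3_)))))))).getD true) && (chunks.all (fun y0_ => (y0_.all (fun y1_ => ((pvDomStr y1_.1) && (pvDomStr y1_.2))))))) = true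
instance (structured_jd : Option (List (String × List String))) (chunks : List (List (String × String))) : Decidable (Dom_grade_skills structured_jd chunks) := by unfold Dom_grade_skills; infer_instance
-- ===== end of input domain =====

-- B inverts A's loop nest: one chunk-major pass fills a dict mapping each distinct
-- lowered token to its (total, direct) counts, then one classification pass does a
-- single dict lookup per candidate; return value only.

-- ===== PORT A =====
-- A's per-skill loop body, named so the proofs can refer to it; it is the literal body of
-- A's `for skill in skill_candidates` loop (state = the six accumulator lists)
def gsAStep (chunks : List (List (String × String))) (required : List String)
    (st : List String × List String × List String × List String × List String × List String)
    (skill : String) : List String × List String × List String × List String × List String × List String :=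
  let token := PySem.Str.lower skill
  let td := chunks.foldl (fun (p : Int × Int) chunk =>
    let text := PySem.Str.lower ((PySem.Dict.mk chunk).getD "text" "")
    if PySem.Str.isIn token text then
      (p.1 + 1,
       if (PySem.Dict.mk chunk).get? "support_level" == some "direct" then p.2 + 1 else p.2)
    else p) ((0 : Int), (0 : Int))
  let total := td.1
  let direct := td.2
  let swe :=
    if direct ≥ 2 ∨ (direct = 1 ∧ total ≥ 2) then (st.1 ++ [skill], st.2.1, st.2.2.1)
    else if direct = 1 then (st.1, st.2.1 ++ [skill], st.2.2.1)
    else if total ≥ 2 then (st.1, st.2.1 ++ [skill], st.2.2.1)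
    else if total = 1 then (st.1, st.2.1, st.2.2.1 ++ [skill])
    else (st.1, st.2.1, st.2.2.1)
  let rdm :=
    if required.contains skill then
      if direct ≥ 1 then (st.2.2.2.1 ++ [skill], st.2.2.2.2.1, st.2.2.2.2.2)
      else if total ≥ 1 then (st.2.2.2.1, st.2.2.2.2.1 ++ [skill], st.2.2.2.2.2)
      else (st.2.2.2.1, st.2.2.2.2.1, st.2.2.2.2.2 ++ [skill])
    else (st.2.2.2.1, st.2.2.2.2.1, st.2.2.2.2.2)
  (swe.1, swe.2.1, swe.2.2, rdm.1, rdm.2.1, rdm.2.2)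

def grade_skills (structured_jd : Option (List (String × List String))) (chunks : List (List (String × String))) : List (String × List String) :=
  match structured_jd with
  | none =>
    [("required", []), ("important", []), ("optional", []), ("strong", []), ("working", []),
     ("exposure", []), ("required_direct", []), ("required_derived", []), ("required_missing", [])]
  | some jd =>
    -- `not structured_jd` is also true for the empty dict
    if jd = [] then
      [("required", []), ("important", []), ("optional", []), ("strong", []), ("working", []),
       ("exposure", []), ("required_direct", []), ("required_derived", []), ("required_missing", [])]
    else
      -- `.get(k, []) or []`: the `or []` is the identity on list values, so it is `getD k []`
      let required := (PySem.Dict.mk jd).getD "must_have_skills" []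
      let important := (PySem.Dict.mk jd).getD "nice_to_have_skills" []
      let optional : List String := []
      -- `isinstance(s, str)` is always true under the type convention
      let skill_candidates := (required ++ important).filter (fun s => !(PySem.Str.strip s).toList.isEmpty)
      if skill_candidates = [] then
        [("required", required), ("important", important), ("optional", optional), ("strong", []),
         ("working", []), ("exposure", []), ("required_direct", []), ("required_derived", []),
         ("required_missing", required)]
      else
        let res := skill_candidates.foldl (gsAStep chunks required)
          (([] : List String), ([] : List String), ([] : List String), ([] : List String), ([] : List String), ([] : List String))
        [("required", required), ("important", important), ("optional", optional),
         ("strong", res.1), ("working", res.2.1), ("exposure", res.2.2.1),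
         ("required_direct", res.2.2.2.1), ("required_derived", res.2.2.2.2.1),
         ("required_missing", res.2.2.2.2.2)]

-- ===== PORT B =====
def gsBase : List (String × List String) :=
  [("required", []), ("important", []), ("optional", []), ("strong", []), ("working", []),
   ("exposure", []), ("required_direct", []), ("required_derived", []), ("required_missing", [])]

-- one chunk of B's chunk-major pass: `for tok, c in counts.items(): if tok in text: bump c`
-- (the in-place mutation of every entry is a map over the dict's items)
def gsBChunkStep (d : PySem.Dict String (Int × Int)) (chunk : List (String × String)) : PySem.Dict String (Int × Int) :=
  let text := PySem.Str.lower ((PySem.Dict.mk chunk).getD "text" "")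
  let hit := (PySem.Dict.mk chunk).get? "support_level" == some "direct"
  PySem.Dict.mk (d.items.map (fun p =>
    if PySem.Str.isIn p.1 text then (p.1, (p.2.1 + 1, if hit then p.2.2 + 1 else p.2.2)) else p))

-- `counts = {s.lower(): [0, 0] for s in candidates}` then the chunk loop
def gsBCounts (cands : List String) (chunks : List (List (String × String))) : PySem.Dict String (Int × Int) :=
  chunks.foldl gsBChunkStep
    (cands.foldl (fun d s => d.insert (PySem.Str.lower s) ((0 : Int), (0 : Int))) PySem.Dict.empty)

-- B's classification loop body: one dict lookup, then `out[key].append(s)` on the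
-- bucket dict (append in place = Dict.modify with default [])
def gsBStep (counts : PySem.Dict String (Int × Int)) (required : List String)
    (out : PySem.Dict String (List String)) (s : String) : PySem.Dict String (List String) :=
  -- `counts[s.lower()]`: the key is always present (inserted from the same candidate list),
  -- so KeyError is unreachable and `.getD (0,0)` is exact
  let td := (counts.get? (PySem.Str.lower s)).getD ((0 : Int), (0 : Int))
  let t := td.1
  let d := td.2
  let out1 :=
    if d ≥ 2 ∨ (d = 1 ∧ t ≥ 2) then out.modify "strong" [] (· ++ [s])
    else if d = 1 ∨ t ≥ 2 then out.modify "working" [] (· ++ [s])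
    else if t = 1 then out.modify "exposure" [] (· ++ [s])
    else out
  -- `key = "required_direct" if d else "required_derived" if t else "required_missing"` (int truthiness)
  if required.contains s then
    out1.modify (if d ≠ 0 then "required_direct" else if t ≠ 0 then "required_derived" else "required_missing") [] (· ++ [s])
  else out1

def grade_skills_alt (structured_jd : Option (List (String × List String))) (chunks : List (List (String × String))) : List (String × List String) :=
  -- Source B builds the bucket dict `out` first and mutates it; the port threads it through
  let out0 := PySem.Dict.mk gsBase
  match structured_jd with
  | none => out0.items
  | some jd =>
    if jd.isEmpty then out0.items
    else
      let required := (PySem.Dict.mk jd).getD "must_have_skills" []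
      let important := (PySem.Dict.mk jd).getD "nice_to_have_skills" []
      -- `out["required"] = required; out["important"] = important`
      let out1 := (out0.insert "required" required).insert "important" important
      let candidates := (required ++ important).filter (fun s => !(PySem.Str.strip s).toList.isEmpty)
      if candidates.isEmpty then (out1.insert "required_missing" required).items
      else
        let counts := gsBCounts candidates chunks
        (candidates.foldl (gsBStep counts required) out1).items

-- ===== PRECONDITION & SPEC =====
def Spec_grade_skills (structured_jd : Option (List (String × List String))) (chunks : List (List (String × String))) (out : List (String × List String)) : Prop := out = grade_skills_alt structured_jd chunks
instance (structured_jd : Option (List (String × List String))) (chunks : List (List (String × String))) (out : List (String × List String)) : Decidable (Spec_grade_skills structured_jd chunks out) := by unfold Spec_grade_skills; infer_instance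

-- ===== CLAIM =====
def Claim_equal_grade_skills : Prop := ∀ (structured_jd : Option (List (String × List String))) (chunks : List (List (String × String))), Dom_grade_skills structured_jd chunks → Spec_grade_skills structured_jd chunks (grade_skills structured_jd chunks)

-- ===== LEMMAS AND PROOFS =====

-- lookup in a dict whose items were mapped by a key-preserving function
theorem gs_get_map_mk (l : List (String × (Int × Int))) (k : String)
    (cnd : String → Bool) (g : Int × Int → Int × Int) :
    (PySem.Dict.mk (l.map (fun p => if cnd p.1 then (p.1, g p.2) else p))).get? k
      = ((PySem.Dict.mk l).get? k).map (fun v => if cnd k then g v else v) := by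
  induction l with
  | nil => rfl
  | cons hd tl ih =>
    obtain ⟨a, v⟩ := hd
    rw [List.map_cons]
    dsimp only
    have hhead : (if cnd a = true then (a, g v) else (a, v)) = (a, if cnd a = true then g v else v) := by
      by_cases hc : cnd a = true <;> simp [hc]
    rw [hhead, PySem.Dict.get?_mk_cons, PySem.Dict.get?_mk_cons]
    by_cases hk : (a == k) = true
    · have ha : a = k := by simpa using hk
      subst ha
      simp [hk]
    · simp [hk, ih]

-- the dict comprehension: every lowered candidate is a key with value (0, 0)
theorem gs_init_get (cands : List String) (d : PySem.Dict String (Int × Int)) (k : String) :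
    (cands.foldl (fun d s => d.insert (PySem.Str.lower s) ((0 : Int), (0 : Int))) d).get? k
      = if k ∈ cands.map PySem.Str.lower then some ((0 : Int), (0 : Int)) else d.get? k := by
  induction cands generalizing d with
  | nil => simp
  | cons c cs ih =>
    simp only [List.foldl_cons, ih, List.map_cons, List.mem_cons]
    by_cases h1 : k ∈ cs.map PySem.Str.lower
    · simp [h1]
    · by_cases h2 : k = PySem.Str.lower c
      · simp [h1, h2, PySem.Dict.get?_insert]
      · simp [h1, h2, PySem.Dict.get?_insert]

set_option maxHeartbeats 1000000 in
-- the chunk-major pass accumulates, at each key, exactly A's two per-skill counts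
theorem gs_fold_get (chunks : List (List (String × String))) (k : String)
    (d : PySem.Dict String (Int × Int)) (t0 d0 : Int) (h : d.get? k = some (t0, d0)) :
    (chunks.foldl gsBChunkStep d).get? k
      = some (t0 + (chunks.countP (fun c => PySem.Str.isIn k (PySem.Str.lower ((PySem.Dict.mk c).getD "text" ""))) : Int),
              d0 + (chunks.countP (fun c => ((PySem.Dict.mk c).get? "support_level" == some "direct") && PySem.Str.isIn k (PySem.Str.lower ((PySem.Dict.mk c).getD "text" ""))) : Int)) := by
  induction chunks generalizing d t0 d0 with
  | nil => simpa using h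
  | cons c cs ih =>
    simp only [List.foldl_cons, List.countP_cons]
    have hstep : (gsBChunkStep d c).get? k
        = some (if PySem.Str.isIn k (PySem.Str.lower ((PySem.Dict.mk c).getD "text" "")) then
                  (t0 + 1, if (PySem.Dict.mk c).get? "support_level" == some "direct" then d0 + 1 else d0)
                else (t0, d0)) := by
      unfold gsBChunkStep
      dsimp only
      rw [gs_get_map_mk d.items k
        (fun a => PySem.Str.isIn a (PySem.Str.lower ((PySem.Dict.mk c).getD "text" "")))
        (fun v => (v.1 + 1, if (PySem.Dict.mk c).get? "support_level" == some "direct" then v.2 + 1 else v.2)),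
        show PySem.Dict.mk d.items = d from rfl, h]
      by_cases hin : PySem.Str.isIn k (PySem.Str.lower ((PySem.Dict.mk c).getD "text" "")) = true
      · simp [hin]
      · simp [hin]
    by_cases hin : PySem.Str.isIn k (PySem.Str.lower ((PySem.Dict.mk c).getD "text" "")) = true
    · rw [if_pos hin] at hstep
      by_cases hhit : ((PySem.Dict.mk c).get? "support_level" == some "direct") = true
      · rw [if_pos hhit] at hstep
        rw [ih _ _ _ hstep]
        simp only [hin, hhit, Bool.true_and, if_true, Option.some.injEq, Prod.mk.injEq]
        constructor <;> push_cast <;> omega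
      · rw [if_neg hhit] at hstep
        rw [ih _ _ _ hstep]
        simp only [hin, hhit, Bool.false_and, if_true, if_false, Option.some.injEq, Prod.mk.injEq]
        constructor <;> push_cast <;> omega
    · rw [if_neg hin] at hstep
      rw [ih _ _ _ hstep]
      simp only [hin, Bool.and_false, if_false, Option.some.injEq, Prod.mk.injEq]
      constructor <;> push_cast <;> omega

-- A's inner loop over the chunks computes the two match counts
theorem gs_inner_loop (token : String) (chunks : List (List (String × String))) (a b : Int) :
    chunks.foldl (fun (p : Int × Int) chunk =>
      if PySem.Str.isIn token (PySem.Str.lower ((PySem.Dict.mk chunk).getD "text" "")) then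
        (p.1 + 1,
         if (PySem.Dict.mk chunk).get? "support_level" == some "direct" then p.2 + 1 else p.2)
      else p) (a, b)
    = (a + (chunks.countP (fun c => PySem.Str.isIn token (PySem.Str.lower ((PySem.Dict.mk c).getD "text" ""))) : Int),
       b + (chunks.countP (fun c => ((PySem.Dict.mk c).get? "support_level" == some "direct") && PySem.Str.isIn token (PySem.Str.lower ((PySem.Dict.mk c).getD "text" ""))) : Int)) := by
  induction chunks generalizing a b with
  | nil => simp
  | cons c cs ih =>
    simp only [List.foldl_cons, List.countP_cons]
    by_cases h1 : PySem.Str.isIn token (PySem.Str.lower ((PySem.Dict.mk c).getD "text" "")) = true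
    · by_cases h2 : ((PySem.Dict.mk c).get? "support_level" == some "direct") = true
      · rw [if_pos h1, if_pos h2, ih]
        simp only [h1, h2, Bool.true_and, if_true, Prod.mk.injEq]
        constructor <;> push_cast <;> omega
      · rw [if_pos h1, if_neg h2, ih]
        simp only [h1, h2, Bool.false_and, if_true, Prod.mk.injEq]
        constructor <;> push_cast <;> omega
    · rw [if_neg h1, ih]
      simp only [h1, Bool.and_false, Prod.mk.injEq]
      constructor <;> push_cast <;> omega

-- for a candidate skill, B's dict lookup returns exactly A's counts
theorem gs_counts_lookup (cands : List String) (chunks : List (List (String × String)))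
    (s : String) (hs : s ∈ cands) :
    (gsBCounts cands chunks).get? (PySem.Str.lower s)
      = some ((chunks.countP (fun c => PySem.Str.isIn (PySem.Str.lower s) (PySem.Str.lower ((PySem.Dict.mk c).getD "text" ""))) : Int),
              (chunks.countP (fun c => ((PySem.Dict.mk c).get? "support_level" == some "direct") && PySem.Str.isIn (PySem.Str.lower s) (PySem.Str.lower ((PySem.Dict.mk c).getD "text" ""))) : Int)) := by
  unfold gsBCounts
  have hinit : (cands.foldl (fun d s => d.insert (PySem.Str.lower s) ((0 : Int), (0 : Int))) PySem.Dict.empty).get? (PySem.Str.lower s)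
      = some ((0 : Int), (0 : Int)) := by
    rw [gs_init_get]
    have hmem : PySem.Str.lower s ∈ cands.map PySem.Str.lower := List.mem_map_of_mem hs
    simp [hmem]
  rw [gs_fold_get chunks (PySem.Str.lower s) _ 0 0 hinit]
  simp

-- the bucket dict after Source B's `out["required"]=...; out["important"]=...`, with the six
-- classification buckets holding the components of A's accumulator state
def gsOut (r0 i0 : List String)
    (st : List String × List String × List String × List String × List String × List String) :
    PySem.Dict String (List String) :=
  PySem.Dict.mk [("required", r0), ("important", i0), ("optional", []),
    ("strong", st.1), ("working", st.2.1), ("exposure", st.2.2.1),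
    ("required_direct", st.2.2.2.1), ("required_derived", st.2.2.2.2.1),
    ("required_missing", st.2.2.2.2.2)]

-- B's dict step performs, on the bucket dict, exactly A's tuple step
set_option maxHeartbeats 1000000 in
theorem gs_step_eq (cands : List String) (chunks : List (List (String × String)))
    (required r0 i0 : List String)
    (st : List String × List String × List String × List String × List String × List String)
    (s : String) (hs : s ∈ cands) :
    gsBStep (gsBCounts cands chunks) required (gsOut r0 i0 st) s
      = gsOut r0 i0 (gsAStep chunks required st s) := by
  unfold gsAStep gsBStep
  dsimp only
  rw [gs_counts_lookup cands chunks s hs, gs_inner_loop]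
  dsimp only
  generalize (chunks.countP (fun c => PySem.Str.isIn (PySem.Str.lower s) (PySem.Str.lower ((PySem.Dict.mk c).getD "text" "")))) = n
  generalize (chunks.countP (fun c => ((PySem.Dict.mk c).get? "support_level" == some "direct") && PySem.Str.isIn (PySem.Str.lower s) (PySem.Str.lower ((PySem.Dict.mk c).getD "text" "")))) = m
  simp only [zero_add, Option.getD_some]
  by_cases hS : (m : Int) ≥ 2 ∨ ((m : Int) = 1 ∧ (n : Int) ≥ 2) <;>
  by_cases hd1 : (m : Int) = 1 <;>
  by_cases ht2 : (n : Int) ≥ 2 <;>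
  by_cases ht1 : (n : Int) = 1 <;>
  by_cases hreq : required.contains s = true <;>
  by_cases hd0 : (m : Int) = 0 <;>
  by_cases ht0 : (n : Int) = 0 <;>
  first
  | (exfalso; omega)
  | (simp only [hS, hd1, ht2, ht1, hreq, hd0, ht0, if_true, if_false, ite_true, ite_false,
      not_true, not_false_iff, if_pos, if_neg, ge_iff_le, le_refl, and_true, true_and,
      false_and, and_false, or_false, false_or, or_true, true_or, if_pos rfl] <;>
     split_ifs <;> simp_all <;> first | rfl | omega)

-- folding B's dict step over the candidates tracks A's tuple fold
theorem gs_fold_eq (chunks : List (List (String × String))) (all : List String)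
    (required r0 i0 : List String) (cands : List String) (hsub : ∀ x ∈ cands, x ∈ all)
    (st : List String × List String × List String × List String × List String × List String) :
    cands.foldl (gsBStep (gsBCounts all chunks) required) (gsOut r0 i0 st)
      = gsOut r0 i0 (cands.foldl (gsAStep chunks required) st) := by
  induction cands generalizing st with
  | nil => rfl
  | cons c cs ih =>
    rw [List.foldl_cons, List.foldl_cons,
      gs_step_eq all chunks required r0 i0 st c (hsub c List.mem_cons_self),
      ih (fun x hx => hsub x (List.mem_cons_of_mem c hx))]

-- ===== VERDICT (by name: the statement is the Claim_ definition above) =====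
theorem grade_skills_spec : Claim_equal_grade_skills := by
  intro structured_jd chunks _
  unfold Spec_grade_skills
  match structured_jd with
  | none => rfl
  | some jd =>
    by_cases hjd : jd = []
    · simp [grade_skills, grade_skills_alt, hjd, gsBase]
    · simp only [grade_skills, grade_skills_alt, if_neg hjd,
        if_neg (by rw [List.isEmpty_iff]; exact hjd : ¬jd.isEmpty = true)]
      by_cases hc : ((PySem.Dict.mk jd).getD "must_have_skills" [] ++ (PySem.Dict.mk jd).getD "nice_to_have_skills" []).filter (fun s => !(PySem.Str.strip s).toList.isEmpty) = []
      · rw [if_pos hc, if_pos (by rw [List.isEmpty_iff]; exact hc : (((PySem.Dict.mk jd).getD "must_have_skills" [] ++ (PySem.Dict.mk jd).getD "nice_to_have_skills" []).filter (fun s => !(PySem.Str.strip s).toList.isEmpty)).isEmpty = true)]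
        rfl
      · rw [if_neg hc, if_neg (by rw [List.isEmpty_iff]; exact hc : ¬(((PySem.Dict.mk jd).getD "must_have_skills" [] ++ (PySem.Dict.mk jd).getD "nice_to_have_skills" []).filter (fun s => !(PySem.Str.strip s).toList.isEmpty)).isEmpty = true)]
        rw [show ((PySem.Dict.mk gsBase).insert "required" ((PySem.Dict.mk jd).getD "must_have_skills" [])).insert "important" ((PySem.Dict.mk jd).getD "nice_to_have_skills" [])
            = gsOut ((PySem.Dict.mk jd).getD "must_have_skills" []) ((PySem.Dict.mk jd).getD "nice_to_have_skills" []) ([], [], [], [], [], []) from rfl,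
          gs_fold_eq chunks _ _ _ _ _ (fun x hx => hx) ([], [], [], [], [], [])]
        rfl
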